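-- pv_equiv track=rewrite | github.com/RicoXu727/DE-Assignments | functions.py | left_compress
-- ===== SOURCE A (Python) =====
-- def left_compress(grid):
--     new_grid = [[0 for _ in range(4)] for _ in range(4)]
--     for i in range(4):
--         pos = 0
--         for j in range(4):
--             if grid[i][j] != 0:
--                 new_grid[i][pos] = grid[i][j]
--                 pos += 1
--     return new_grid
-- ===== SOURCE B (Python) =====
-- def left_compress(grid):
--     # Stable sort each row by the key "is zero": False (nonzero) sorts before True (zero),
--     # and stability preserves the original order of the nonzero values.
--     return [sorted([grid[i][j] for j in range(4)], key=lambda v: v == 0)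
--             for i in range(4)]
-- ===== Notes on version B (the rewrite author's own statement) =====
-- stated objective: alternative
-- what changed: Replaces the preallocated-zero-grid write-pointer scatter with a stable sort of each row by the boolean key 'value == 0' (False before True), so nonzeros move left and zeros right with order preserved by stability.
import Mathlib
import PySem

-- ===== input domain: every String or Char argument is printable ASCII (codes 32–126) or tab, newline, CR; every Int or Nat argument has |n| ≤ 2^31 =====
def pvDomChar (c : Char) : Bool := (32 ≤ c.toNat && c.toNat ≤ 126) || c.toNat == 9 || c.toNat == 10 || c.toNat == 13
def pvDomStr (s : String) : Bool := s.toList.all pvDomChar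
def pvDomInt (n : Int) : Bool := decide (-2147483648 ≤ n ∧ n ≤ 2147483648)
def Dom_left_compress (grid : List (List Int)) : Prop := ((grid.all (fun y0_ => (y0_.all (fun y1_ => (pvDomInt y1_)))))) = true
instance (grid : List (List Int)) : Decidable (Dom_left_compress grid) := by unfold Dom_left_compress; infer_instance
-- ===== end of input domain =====

-- B replaces A's preallocated-zero-grid write-pointer scatter by a stable sort of each row under the key 'v == 0'; objective: alternative.
-- ===== PORT A =====
-- the inner 'for j in range(4)' loop of A, as a named fold (state: current new_grid[i], pos)
def innerA (row : List Int) (start : List Int) : List Int × Nat :=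
  (PySem.List.pyRange 0 4 1).foldl (fun st j =>
      let v := (PySem.List.pyGet? row j).getD 0
      if v ≠ 0 then (st.1.set st.2 v, st.2 + 1) else st)
    (start, (0 : Nat))

def left_compress (grid : List (List Int)) : List (List Int) :=
  let new_grid := (PySem.List.pyRange 0 4 1).map (fun _ => (PySem.List.pyRange 0 4 1).map (fun _ => (0 : Int)))
  (PySem.List.pyRange 0 4 1).foldl (fun ng i =>
    let res := innerA ((PySem.List.pyGet? grid i).getD []) ((PySem.List.pyGet? ng i).getD [])
    ng.set i.toNat res.1) new_grid

-- ===== PORT B =====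
-- B's row: collect row[0..3] and stable-sort it by the boolean key 'v == 0' (False < True)
def rowB (row : List Int) : List Int :=
  PySem.List.sorted ((PySem.List.pyRange 0 4 1).map (fun j => (PySem.List.pyGet? row j).getD 0))
    (fun v => v == 0) false

def left_compress_alt (grid : List (List Int)) : List (List Int) :=
  (PySem.List.pyRange 0 4 1).map (fun i => rowB ((PySem.List.pyGet? grid i).getD []))

-- ===== PRECONDITION & SPEC =====
-- Pre_: exactly the inputs where A returns (A indexes grid[i][j] for all i,j < 4; otherwise IndexError).
def Pre_left_compress (grid : List (List Int)) : Prop :=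
  4 ≤ grid.length ∧ ∀ r ∈ grid.take 4, 4 ≤ r.length
instance (grid : List (List Int)) : Decidable (Pre_left_compress grid) := by unfold Pre_left_compress; infer_instance
def pvWitness_left_compress : List (List Int) := [[1,0,2,0],[0,0,0,0],[5,6,7,8],[0,0,0,9]]

def Spec_left_compress (grid : List (List Int)) (out : List (List Int)) : Prop := out = left_compress_alt grid
instance (grid : List (List Int)) (out : List (List Int)) : Decidable (Spec_left_compress grid out) := by unfold Spec_left_compress; infer_instance

-- ===== CLAIM (what is proved, stated in full; the proofs are below) =====
def Claim_equal_left_compress : Prop := ∀ (grid : List (List Int)), Dom_left_compress grid → Pre_left_compress grid → Spec_left_compress grid (left_compress grid)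

-- ===== LEMMAS AND PROOFS =====
lemma pg0 {α : Type} (x y z w : α) (t : List α) : PySem.List.pyGet? (x::y::z::w::t) 0 = some x :=
  PySem.List.pyGet?_zero_cons _ _
lemma pg1 {α : Type} (x y z w : α) (t : List α) : PySem.List.pyGet? (x::y::z::w::t) 1 = some y := by
  simpa using PySem.List.pyGet?_ofNat (xs := x::y::z::w::t) (n := 1) (by simp)
lemma pg2 {α : Type} (x y z w : α) (t : List α) : PySem.List.pyGet? (x::y::z::w::t) 2 = some z := by
  simpa using PySem.List.pyGet?_ofNat (xs := x::y::z::w::t) (n := 2) (by simp)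
lemma pg3 {α : Type} (x y z w : α) (t : List α) : PySem.List.pyGet? (x::y::z::w::t) 3 = some w := by
  simpa using PySem.List.pyGet?_ofNat (xs := x::y::z::w::t) (n := 3) (by simp)

lemma rowEq (a b c d : Int) (t : List Int) :
    (innerA (a::b::c::d::t) [0,0,0,0]).1 = rowB (a::b::c::d::t) := by
  have hr : PySem.List.pyRange 0 4 1 = [0,1,2,3] := by decide
  unfold innerA rowB
  rw [hr]
  by_cases ha : a = 0 <;> by_cases hb : b = 0 <;> by_cases hc : c = 0 <;> by_cases hd : d = 0 <;>
    simp [ha, hb, hc, hd, pg1, pg2, pg3, List.set,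
      PySem.List.sorted, PySem.List.insertBy, Bool.lt_iff, beq_iff_eq]

-- ===== VERDICT (by name: the statement is the Claim_ definition above) =====
theorem left_compress_spec : Claim_equal_left_compress := by
  intro grid _ hpre
  obtain ⟨hlen, hrows⟩ := hpre
  match grid, hlen with
  | r0 :: r1 :: r2 :: r3 :: rest, _ =>
    have h0 := hrows r0 (by simp)
    have h1 := hrows r1 (by simp)
    have h2 := hrows r2 (by simp)
    have h3 := hrows r3 (by simp)
    match r0, h0 with
    | a0 :: b0 :: c0 :: d0 :: t0, _ =>
    match r1, h1 with
    | a1 :: b1 :: c1 :: d1 :: t1, _ =>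
    match r2, h2 with
    | a2 :: b2 :: c2 :: d2 :: t2, _ =>
    match r3, h3 with
    | a3 :: b3 :: c3 :: d3 :: t3, _ =>
    have hr : PySem.List.pyRange 0 4 1 = [0,1,2,3] := by decide
    show left_compress _ = left_compress_alt _
    simp only [left_compress, left_compress_alt, hr, List.foldl, List.map,
      pg0, pg1, pg2, pg3, Option.getD_some]
    have t2 : Int.toNat 2 = 2 := rfl
    have t3 : Int.toNat 3 = 3 := rfl
    norm_num [List.set, rowEq, pg1, pg2, pg3, t2, t3, List.getElem_cons_succ]
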